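-- pv_equiv track=rewrite | github.com/echuawu/sonic-mgmt | sonic-tool/sku/sku.py | get_file_names
-- ===== SOURCE A (Python) =====
-- from collections import OrderedDict
--
-- SPEED_ALPHA = {10 : "S", 25: "A", 50 : "D", 100 : "C", 200 : "V" }
--
-- def get_file_names(port_data, platform):
--
--     counts = {}
--
--     for p, d in port_data.items():
--         counts[d["speed"]] = counts.get(d["speed"], 0) + d["split"]
--
--     counts = OrderedDict(sorted(counts.items()))
--
--     sai_file = "sai_{}_{}.xml".format(platform.replace("msn",""), "_".join(["{}x{}g".format(c, s) for s, c in counts.items()]))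
--
--     # sort according to the speed
--     sku_string = ""
--     for speed, num in counts.items():
--         sku_string = sku_string + SPEED_ALPHA[speed] + str(num)
--
--     sku_name = "Mellanox-{}-{}".format(platform.replace("msn", "SN").upper(), sku_string)
--
--     return sku_name, sai_file
-- ===== SOURCE B (Python) =====
-- from itertools import groupby
--
-- SPEED_ALPHA = {10 : "S", 25: "A", 50 : "D", 100 : "C", 200 : "V" }
--
-- def get_file_names(port_data, platform):
--     pairs = sorted(((d["speed"], d["split"]) for d in port_data.values()),
--                    key=lambda t: t[0])
--     groups = [(s, sum(n for _, n in grp))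
--               for s, grp in groupby(pairs, key=lambda t: t[0])]
--
--     sai_file = "sai_{}_{}.xml".format(platform.replace("msn", ""),
--                                       "_".join("{}x{}g".format(c, s) for s, c in groups))
--     sku_string = "".join(SPEED_ALPHA[s] + str(c) for s, c in groups)
--     sku_name = "Mellanox-{}-{}".format(platform.replace("msn", "SN").upper(), sku_string)
--     return sku_name, sai_file
-- ===== Notes on version B (the rewrite author's own statement) =====
-- stated objective: alternative
-- what changed: Replaces A's dict-accumulate-then-sort aggregation by a sort-then-group pass: the (speed, split) pairs are sorted by speed and itertools.groupby sums each consecutive run, yielding the (speed, count) pairs already in ascending speed order; the SKU/SAI strings are then built by join instead of a concatenation loop.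
import Mathlib
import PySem

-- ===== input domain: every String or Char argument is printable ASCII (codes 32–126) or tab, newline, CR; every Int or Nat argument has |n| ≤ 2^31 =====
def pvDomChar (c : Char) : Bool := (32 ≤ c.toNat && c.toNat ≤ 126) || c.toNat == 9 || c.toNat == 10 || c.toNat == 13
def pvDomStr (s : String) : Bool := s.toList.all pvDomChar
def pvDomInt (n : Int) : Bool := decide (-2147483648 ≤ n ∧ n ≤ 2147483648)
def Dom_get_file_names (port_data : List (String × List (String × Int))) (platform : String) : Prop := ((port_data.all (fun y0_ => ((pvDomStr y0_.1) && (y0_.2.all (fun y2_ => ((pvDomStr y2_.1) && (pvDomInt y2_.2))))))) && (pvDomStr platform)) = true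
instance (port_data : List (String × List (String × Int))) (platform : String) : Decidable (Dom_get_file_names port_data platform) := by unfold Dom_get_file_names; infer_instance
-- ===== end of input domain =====

-- B replaces A's dict-accumulate-then-sort aggregation by sort-then-group (sort the (speed, split)
-- pairs by speed, then sum the splits of each consecutive run); same return value, objective: alternative.

-- SPEED_ALPHA = {10: "S", 25: "A", 50: "D", 100: "C", 200: "V"}
def pvSpeedAlpha : PySem.Dict Int String :=
  PySem.Dict.ofList [(10, "S"), (25, "A"), (50, "D"), (100, "C"), (200, "V")]

-- d["speed"] / d["split"]: the inner Python dict, normalised from the association list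
-- (last value wins, key keeps its first position); the default 0 is unreachable inside Pre_.
def pvSpeed (d : List (String × Int)) : Int := (PySem.Dict.ofList d).getD "speed" 0
def pvSplit (d : List (String × Int)) : Int := (PySem.Dict.ofList d).getD "split" 0

-- ===== PORT A =====
def get_file_names (port_data : List (String × List (String × Int))) (platform : String) : String × String :=
  -- for p, d in port_data.items(): counts[d["speed"]] = counts.get(d["speed"], 0) + d["split"]
  let counts : PySem.Dict Int Int :=
    (PySem.Dict.ofList port_data).items.foldl
      (fun c pd => c.insert (pvSpeed pd.2) (c.getD (pvSpeed pd.2) 0 + pvSplit pd.2))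
      PySem.Dict.empty
  -- counts = OrderedDict(sorted(counts.items())): dict keys are distinct, so the tuple sort is the sort by key
  let sortedCounts := PySem.List.sorted counts.items Prod.fst
  let sai_file := "sai_" ++ PySem.Str.replace platform "msn" "" ++ "_"
      ++ PySem.Str.join "_" (sortedCounts.map (fun sc =>
            PySem.Int.toStr sc.2 ++ "x" ++ PySem.Int.toStr sc.1 ++ "g")) ++ ".xml"
  -- SPEED_ALPHA[speed]: the default "" is unreachable inside Pre_
  let sku_string := sortedCounts.foldl
      (fun acc sn => acc ++ pvSpeedAlpha.getD sn.1 "" ++ PySem.Int.toStr sn.2) ""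
  let sku_name := "Mellanox-" ++ PySem.Str.upper (PySem.Str.replace platform "msn" "SN") ++ "-" ++ sku_string
  (sku_name, sai_file)

-- ===== PORT B =====
-- (d["speed"], d["split"]) for one inner dict
def pvPair (d : List (String × Int)) : Int × Int := (pvSpeed d, pvSplit d)

-- [(s, sum(n for _, n in grp)) for s, grp in groupby(pairs, key=lambda t: t[0])]
def pvGroupSum : List (Int × Int) → List (Int × Int)
  | [] => []
  | (s, n) :: t =>
      (s, n + ((t.takeWhile (fun q => q.1 == s)).map Prod.snd).sum)
        :: pvGroupSum (t.dropWhile (fun q => q.1 == s))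
termination_by l => l.length
decreasing_by
  exact Nat.lt_succ_of_le (List.length_dropWhile_le _ _)

def get_file_names_alt (port_data : List (String × List (String × Int))) (platform : String) : String × String :=
  -- pairs = sorted(((d["speed"], d["split"]) for d in port_data.values()), key=lambda t: t[0])
  let pairs := PySem.List.sorted ((PySem.Dict.ofList port_data).values.map pvPair) Prod.fst
  let groups := pvGroupSum pairs
  let sai_file := "sai_" ++ PySem.Str.replace platform "msn" "" ++ "_"
      ++ PySem.Str.join "_" (groups.map (fun sc =>
            PySem.Int.toStr sc.2 ++ "x" ++ PySem.Int.toStr sc.1 ++ "g")) ++ ".xml"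
  let sku_string := PySem.Str.join "" (groups.map (fun sc =>
      pvSpeedAlpha.getD sc.1 "" ++ PySem.Int.toStr sc.2))
  let sku_name := "Mellanox-" ++ PySem.Str.upper (PySem.Str.replace platform "msn" "SN") ++ "-" ++ sku_string
  (sku_name, sai_file)

-- ===== PRECONDITION & SPEC =====
-- Pre_ excludes exactly the inputs where Python A raises KeyError: an inner dict missing the
-- "speed" or "split" key, or a speed that is not a key of SPEED_ALPHA.
def Pre_get_file_names (port_data : List (String × List (String × Int))) (platform : String) : Prop :=
  ∀ pr ∈ (PySem.Dict.ofList port_data).items,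
    (PySem.Dict.ofList pr.2).contains "speed" = true ∧
    (PySem.Dict.ofList pr.2).contains "split" = true ∧
    pvSpeedAlpha.contains (pvSpeed pr.2) = true
instance (port_data : List (String × List (String × Int))) (platform : String) : Decidable (Pre_get_file_names port_data platform) := by unfold Pre_get_file_names; infer_instance

def pvWitness_get_file_names : (List (String × List (String × Int))) × String :=
  ([("p1", [("speed", 25), ("split", 2)]), ("p2", [("speed", 10), ("split", 1)])], "msn2700")

def Spec_get_file_names (port_data : List (String × List (String × Int))) (platform : String) (out : String × String) : Prop := out = get_file_names_alt port_data platform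
instance (port_data : List (String × List (String × Int))) (platform : String) (out : String × String) : Decidable (Spec_get_file_names port_data platform out) := by unfold Spec_get_file_names; infer_instance

-- ===== CLAIM (what is proved, stated in full; the proofs are below) =====
def Claim_equal_get_file_names : Prop := ∀ (port_data : List (String × List (String × Int))) (platform : String), Dom_get_file_names port_data platform → Pre_get_file_names port_data platform → Spec_get_file_names port_data platform (get_file_names port_data platform)

-- ===== LEMMAS AND PROOFS =====

-- proof-side helpers
def pvStep (c : PySem.Dict Int Int) (x : Int × Int) : PySem.Dict Int Int :=
  c.insert x.1 (c.getD x.1 0 + x.2)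

-- total split count of speed k in a list of (speed, split) pairs
def pvTotal (k : Int) (L : List (Int × Int)) : Int :=
  ((L.filter (fun q => q.1 == k)).map Prod.snd).sum

theorem pvGetD_fold (L : List (Int × Int)) (c : PySem.Dict Int Int) (k : Int) :
    (L.foldl pvStep c).getD k 0 = c.getD k 0 + pvTotal k L := by
  induction L generalizing c with
  | nil => simp [pvTotal]
  | cons x t ih =>
      simp only [List.foldl_cons, ih, pvStep, pvTotal, List.filter_cons]
      rw [PySem.Dict.getD_insert]
      by_cases h : x.1 = k
      · simp [h]; ring
      · simp [h, Ne.symm h]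

theorem pvAssocMap (l : List (Int × Int)) (g : Int → Int) (h : ∀ p ∈ l, p.2 = g p.1) :
    l = (l.map Prod.fst).map (fun k => (k, g k)) := by
  induction l with
  | nil => rfl
  | cons x t ih =>
      simp only [List.map_cons]
      rw [← ih (fun p hp => h p (List.mem_cons_of_mem _ hp)),
        ← h x (List.mem_cons_self)]

theorem pvDropWhileFalse {α : Type} (l xs : List α) (p : α → Bool) (x : α)
    (h : l.dropWhile p = x :: xs) : p x = false := by
  have := List.head_dropWhile_not p (l := l) (by simp [h])
  simp only [h] at this ⊢
  simpa using this

theorem pvGroupSpec (w : List (Int × Int)) (hw : w.Pairwise (fun a b => a.1 ≤ b.1)) :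
    ((pvGroupSum w).Pairwise fun a b => a.1 < b.1) ∧
    (∀ k, k ∈ (pvGroupSum w).map Prod.fst ↔ k ∈ w.map Prod.fst) ∧
    (∀ p ∈ pvGroupSum w, p.2 = pvTotal p.1 w) := by
  match w with
  | [] => simp [pvGroupSum]
  | (s, n) :: t =>
    rw [List.pairwise_cons] at hw
    obtain ⟨hts, ht⟩ := hw
    have hsplit : t = t.takeWhile (fun q => q.1 == s) ++ t.dropWhile (fun q => q.1 == s) :=
      (List.takeWhile_append_dropWhile).symm
    have hrun : ∀ x ∈ t.takeWhile (fun q : Int × Int => q.1 == s), x.1 = s := by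
      intro x hx
      simpa using List.mem_takeWhile_imp hx
    have hrest_pw : (t.dropWhile (fun q : Int × Int => q.1 == s)).Pairwise (fun a b => a.1 ≤ b.1) :=
      ht.sublist (List.dropWhile_sublist _)
    have hrest_mem : ∀ x ∈ t.dropWhile (fun q : Int × Int => q.1 == s), x ∈ t :=
      fun x hx => (List.dropWhile_sublist _).mem hx
    have hrest_gt : ∀ x ∈ t.dropWhile (fun q : Int × Int => q.1 == s), s < x.1 := by
      cases hre : t.dropWhile (fun q : Int × Int => q.1 == s) with
      | nil => intro x hx; simp at hx
      | cons h hs =>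
          have hhne : h.1 ≠ s := by simpa using pvDropWhileFalse t hs _ h hre
          have hh_le : s ≤ h.1 := hts h (hrest_mem h (by rw [hre]; simp))
          intro x hx
          rcases List.mem_cons.mp hx with rfl | hx'
          · omega
          · have hpw := hre ▸ hrest_pw
            have : h.1 ≤ x.1 := (List.pairwise_cons.mp hpw).1 x hx'
            omega
    have htot_s : pvTotal s ((s, n) :: t)
        = n + ((t.takeWhile (fun q : Int × Int => q.1 == s)).map Prod.snd).sum := by
      unfold pvTotal
      rw [List.filter_cons]
      simp only [show ((s, n) : Int × Int).1 == s from by simp, if_pos]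
      conv_lhs => rw [hsplit]
      rw [List.filter_append,
        List.filter_eq_self.mpr (fun x hx => by simp [hrun x hx]),
        List.filter_eq_nil_iff.mpr (fun x hx => by simp [Int.ne_of_gt (hrest_gt x hx)])]
      simp
    have htot_k : ∀ k, s < k → pvTotal k ((s, n) :: t)
        = pvTotal k (t.dropWhile (fun q : Int × Int => q.1 == s)) := by
      intro k hk
      unfold pvTotal
      rw [List.filter_cons]
      have h1 : (((s, n) : Int × Int).1 == k) = false := by simp; omega
      rw [h1]
      simp only [if_neg Bool.false_ne_true]
      conv_lhs => rw [hsplit]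
      rw [List.filter_append,
        List.filter_eq_nil_iff.mpr (fun x hx => by simp [hrun x hx]; omega)]
      simp
    have hlen : (t.dropWhile (fun q : Int × Int => q.1 == s)).length < ((s, n) :: t).length :=
      Nat.lt_succ_of_le (List.length_dropWhile_le _ _)
    obtain ⟨ihpw, ihmem, ihval⟩ := pvGroupSpec (t.dropWhile (fun q => q.1 == s)) hrest_pw
    have heq : pvGroupSum ((s, n) :: t)
        = (s, n + ((t.takeWhile (fun q : Int × Int => q.1 == s)).map Prod.snd).sum)
          :: pvGroupSum (t.dropWhile (fun q => q.1 == s)) := by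
      rw [pvGroupSum]
    have hkey_gt : ∀ q ∈ pvGroupSum (t.dropWhile (fun q : Int × Int => q.1 == s)), s < q.1 := by
      intro q hq
      have : q.1 ∈ (t.dropWhile (fun q : Int × Int => q.1 == s)).map Prod.fst :=
        (ihmem q.1).mp (List.mem_map_of_mem hq)
      obtain ⟨x, hx, hxe⟩ := List.mem_map.mp this
      exact hxe ▸ hrest_gt x hx
    refine ⟨?_, ?_, ?_⟩
    · rw [heq, List.pairwise_cons]
      exact ⟨hkey_gt, ihpw⟩
    · intro k
      rw [heq]
      simp only [List.map_cons, List.mem_cons]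
      constructor
      · rintro (rfl | hk)
        · left; rfl
        · have : k ∈ (t.dropWhile (fun q : Int × Int => q.1 == s)).map Prod.fst := (ihmem k).mp hk
          obtain ⟨x, hx, hxe⟩ := List.mem_map.mp this
          exact Or.inr (hxe ▸ List.mem_map_of_mem (hrest_mem x hx))
      · rintro (rfl | hk')
        · left; rfl
        · obtain ⟨x, hx, hxe⟩ := List.mem_map.mp hk'
          rw [hsplit] at hx
          rcases List.mem_append.mp hx with hx1 | hx2
          · left; rw [← hxe, hrun x hx1]
          · exact Or.inr ((ihmem k).mpr (hxe ▸ List.mem_map_of_mem hx2))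
    · intro q hq
      rw [heq] at hq
      rcases List.mem_cons.mp hq with rfl | hq'
      · simpa using htot_s.symm
      · rw [ihval q hq', htot_k q.1 (hkey_gt q hq')]
termination_by w.length
decreasing_by
  exact hlen

theorem pvMain (L : List (Int × Int)) :
    PySem.List.sorted (L.foldl pvStep PySem.Dict.empty).items Prod.fst
      = pvGroupSum (PySem.List.sorted L Prod.fst) := by
  have hwpw : (PySem.List.sorted L Prod.fst).Pairwise (fun a b => a.1 ≤ b.1) :=
    PySem.List.sorted_pairwise L Prod.fst
  have hperm : (PySem.List.sorted L Prod.fst).Perm L := PySem.List.sorted_perm L Prod.fst false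
  obtain ⟨hpw_lt, hmem, hval⟩ := pvGroupSpec _ hwpw
  have hkeys : (L.foldl pvStep PySem.Dict.empty).keys
      = PySem.Set.update (PySem.Dict.empty (κ := Int) (ν := Int)).keys (L.map Prod.fst) :=
    PySem.Dict.keys_foldl_insert_key L Prod.fst (fun d x => d.getD x.1 0 + x.2) PySem.Dict.empty
  have hnodup : (L.foldl pvStep PySem.Dict.empty).keys.Nodup :=
    PySem.Dict.nodup_keys_foldl_insert_key L Prod.fst (fun d x => d.getD x.1 0 + x.2)
      PySem.Dict.empty (by simp [PySem.Dict.keys_empty])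
  have hitems : (L.foldl pvStep PySem.Dict.empty).items
      = (L.foldl pvStep PySem.Dict.empty).keys.map (fun k => (k, pvTotal k L)) := by
    rw [PySem.Dict.items_eq_map_keys _ hnodup 0]
    apply List.map_congr_left
    intro k _
    rw [pvGetD_fold, PySem.Dict.getD_empty]
    simp
  have htoteq : ∀ k, pvTotal k (PySem.List.sorted L Prod.fst) = pvTotal k L := by
    intro k
    exact ((hperm.filter _).map _).sum_eq
  have hgroup : pvGroupSum (PySem.List.sorted L Prod.fst)
      = ((pvGroupSum (PySem.List.sorted L Prod.fst)).map Prod.fst).map (fun k => (k, pvTotal k L)) := by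
    rw [← pvAssocMap _ _ (fun p hp => by rw [hval p hp, htoteq])]
  have hkeysG_pw : ((pvGroupSum (PySem.List.sorted L Prod.fst)).map Prod.fst).Pairwise (· < ·) :=
    List.pairwise_map.mpr hpw_lt
  have hkeysG_nodup : ((pvGroupSum (PySem.List.sorted L Prod.fst)).map Prod.fst).Nodup :=
    hkeysG_pw.imp Int.ne_of_lt
  have hkeyperm : ((pvGroupSum (PySem.List.sorted L Prod.fst)).map Prod.fst).Perm
      (L.foldl pvStep PySem.Dict.empty).keys := by
    rw [List.perm_ext_iff_of_nodup hkeysG_nodup hnodup]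
    intro k
    rw [hmem k, hkeys]
    rw [(hperm.map Prod.fst).mem_iff]
    simp [PySem.Set.mem_update, PySem.Dict.keys_empty]
  apply PySem.List.sorted_eq_of_perm_of_pairwise_lt
  · rw [hitems, hgroup]
    exact hkeyperm.map _
  · exact hpw_lt

theorem pvJoinEmptyCons (s : String) (parts : List String) :
    PySem.Str.join "" (s :: parts) = s ++ PySem.Str.join "" parts := by
  apply String.toList_inj.mp
  simp only [String.toList_append, PySem.Str.toList_join, List.map_cons]
  cases parts with
  | nil => simp [PySem.Chars.join_singleton, PySem.Chars.join_nil]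
  | cons b l =>
      rw [List.map_cons, show ("" : String).toList = [] from rfl, PySem.Chars.join_cons_cons]
      simp

theorem pvFoldlAppendJoin {α : Type} (l : List α) (g : α → String) (acc : String) :
    l.foldl (fun a x => a ++ g x) acc = acc ++ PySem.Str.join "" (l.map g) := by
  induction l generalizing acc with
  | nil =>
      apply String.toList_inj.mp
      simp [PySem.Str.toList_join, PySem.Chars.join_nil]
  | cons x t ih =>
      simp only [List.foldl_cons, List.map_cons, ih, pvJoinEmptyCons, String.append_assoc]

-- ===== VERDICT (by name: the statement is the Claim_ definition above) =====
theorem get_file_names_spec : Claim_equal_get_file_names := by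
  intro port_data platform _hdom _hpre
  unfold Spec_get_file_names get_file_names get_file_names_alt
  have hL : (PySem.Dict.ofList port_data).values.map pvPair
      = (PySem.Dict.ofList port_data).items.map (fun pd => pvPair pd.2) := by
    simp [PySem.Dict.values, List.map_map]
  have hfold : (PySem.Dict.ofList port_data).items.foldl
        (fun c pd => c.insert (pvSpeed pd.2) (c.getD (pvSpeed pd.2) 0 + pvSplit pd.2))
        PySem.Dict.empty
      = ((PySem.Dict.ofList port_data).items.map (fun pd => pvPair pd.2)).foldl pvStep
        PySem.Dict.empty := by
    rw [List.foldl_map]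
    rfl
  have hlists : PySem.List.sorted
        ((PySem.Dict.ofList port_data).items.foldl
          (fun c pd => c.insert (pvSpeed pd.2) (c.getD (pvSpeed pd.2) 0 + pvSplit pd.2))
          PySem.Dict.empty).items Prod.fst
      = pvGroupSum (PySem.List.sorted ((PySem.Dict.ofList port_data).values.map pvPair) Prod.fst) := by
    rw [hfold, hL]
    exact pvMain _
  simp only [hlists]
  simp only [String.append_assoc]
  rw [pvFoldlAppendJoin _ (fun sn : Int × Int => pvSpeedAlpha.getD sn.1 "" ++ PySem.Int.toStr sn.2) ""]
  simp only [String.empty_append]
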